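-- pv_equiv track=rewrite | github.com/Kims-DeveloperGroup/sprint-runtime | core/git_ops.py | _decode_git_quoted_path
-- ===== SOURCE A (Python) =====
-- def _decode_git_quoted_path(path_text: str) -> str:
--     normalized = str(path_text or "").strip()
--     if len(normalized) < 2 or not (normalized.startswith('"') and normalized.endswith('"')):
--         return normalized
--
--     body = normalized[1:-1]
--     raw_bytes = bytearray()
--     index = 0
--     simple_escapes = {
--         "a": 0x07,
--         "b": 0x08,
--         "f": 0x0C,
--         "n": 0x0A,
--         "r": 0x0D,
--         "t": 0x09,
--         "v": 0x0B,
--         "\\": 0x5C,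
--         '"': 0x22,
--     }
--
--     while index < len(body):
--         char = body[index]
--         if char != "\\":
--             raw_bytes.extend(char.encode("utf-8"))
--             index += 1
--             continue
--         index += 1
--         if index >= len(body):
--             raw_bytes.append(0x5C)
--             break
--         escaped = body[index]
--         if escaped in simple_escapes:
--             raw_bytes.append(simple_escapes[escaped])
--             index += 1
--             continue
--         if escaped in "01234567":
--             octal_digits = [escaped]
--             index += 1
--             for _ in range(2):
--                 if index < len(body) and body[index] in "01234567":
--                     octal_digits.append(body[index])
--                     index += 1
--                 else:
--                     break
--             raw_bytes.append(int("".join(octal_digits), 8))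
--             continue
--         raw_bytes.extend(escaped.encode("utf-8"))
--         index += 1
--
--     return raw_bytes.decode("utf-8", errors="surrogateescape")
-- ===== SOURCE B (Python) =====
-- # Alternative decomposition: split the body on backslashes once and decode each
-- # fragment by its head character; octal runs found via lstrip instead of an index walk.
-- def _decode_git_quoted_path(path_text: str) -> str:
--     normalized = str(path_text or "").strip()
--     if len(normalized) < 2 or not (normalized.startswith('"') and normalized.endswith('"')):
--         return normalized
--
--     body = normalized[1:-1]
--     simple = {"a": 0x07, "b": 0x08, "f": 0x0C, "n": 0x0A, "r": 0x0D,
--               "t": 0x09, "v": 0x0B, '"': 0x22}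
--     parts = body.split("\\")
--     out = bytearray(parts[0].encode("utf-8"))
--     i = 1
--     while i < len(parts):
--         p = parts[i]
--         if p == "":
--             out.append(0x5C)
--             if i + 1 < len(parts):
--                 # an escaped backslash: the next fragment is plain literal text
--                 i += 1
--                 out.extend(parts[i].encode("utf-8"))
--             # else: a lone backslash at the very end of the body
--         elif p[0] in simple:
--             out.append(simple[p[0]])
--             out.extend(p[1:].encode("utf-8"))
--         elif "0" <= p[0] <= "7":
--             head = p[:3]
--             n = len(head) - len(head.lstrip("01234567"))
--             out.append(int(head[:n], 8))
--             out.extend(p[n:].encode("utf-8"))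
--         else:
--             out.extend(p.encode("utf-8"))
--         i += 1
--     return out.decode("utf-8", errors="surrogateescape")
-- ===== Notes on version B (the rewrite author's own statement) =====
-- stated objective: alternative
-- what changed: The manual index-walk over the body is replaced by splitting the body on backslashes once and decoding each fragment by its head character (dict lookup / lstrip-measured octal run / literal), appending fragment remainders wholesale.
-- outside the precondition, e.g. on _decode_git_quoted_path('"\\400"'): A raises ValueError, B raises ValueError
import Mathlib
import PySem

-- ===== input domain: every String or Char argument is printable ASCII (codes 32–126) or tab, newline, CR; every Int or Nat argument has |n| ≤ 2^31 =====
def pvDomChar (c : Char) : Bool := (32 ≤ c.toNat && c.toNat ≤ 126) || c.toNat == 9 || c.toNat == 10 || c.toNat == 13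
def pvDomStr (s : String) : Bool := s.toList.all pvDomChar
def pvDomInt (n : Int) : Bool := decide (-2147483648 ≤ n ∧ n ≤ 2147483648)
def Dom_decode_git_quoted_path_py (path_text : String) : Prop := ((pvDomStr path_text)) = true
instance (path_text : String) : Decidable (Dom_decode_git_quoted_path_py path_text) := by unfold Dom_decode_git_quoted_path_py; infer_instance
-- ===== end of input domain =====

-- B splits the body on backslashes once and decodes each fragment by its head character
-- (an alternative decomposition of the same O(n) work, no speed claim).

-- ===== PORT A =====

-- simple_escapes lookup (A's dict, including the '\\' and '"' entries)
def pvSimpleA? (c : Char) : Option Nat :=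
  if c = 'a' then some 0x07 else if c = 'b' then some 0x08
  else if c = 'f' then some 0x0C else if c = 'n' then some 0x0A
  else if c = 'r' then some 0x0D else if c = 't' then some 0x09
  else if c = 'v' then some 0x0B else if c = '\\' then some 0x5C
  else if c = '"' then some 0x22 else none

def pvIsOct (c : Char) : Bool := '0' ≤ c && c ≤ '7'
def pvOctVal (c : Char) : Nat := c.toNat - 48

-- bytes.decode("utf-8", errors="surrogateescape"), shared by both Pythons: exact
-- whenever the byte string is valid UTF-8 (which Pre_ guarantees); on invalid bytes
-- Python yields lone surrogates (no Lean Char), those inputs are outside Pre_.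
def pvDecode : List Nat → List Char
  | [] => []
  | b :: bs =>
    if b < 0x80 then Char.ofNat b :: pvDecode bs
    else if b < 0xC2 then Char.ofNat 0xFFFD :: pvDecode bs   -- invalid lead; outside Pre_
    else if b ≤ 0xDF then
      match bs with
      | c1 :: r =>
        if 0x80 ≤ c1 && c1 ≤ 0xBF then
          Char.ofNat ((b - 0xC0) * 0x40 + (c1 - 0x80)) :: pvDecode r
        else Char.ofNat 0xFFFD :: pvDecode (c1 :: r)
      | [] => [Char.ofNat 0xFFFD]
    else if b ≤ 0xEF then
      match bs with
      | c1 :: c2 :: r =>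
        if ((if b = 0xE0 then 0xA0 ≤ c1 && c1 ≤ 0xBF
             else if b = 0xED then 0x80 ≤ c1 && c1 ≤ 0x9F
             else 0x80 ≤ c1 && c1 ≤ 0xBF) && (0x80 ≤ c2 && c2 ≤ 0xBF)) then
          Char.ofNat ((b - 0xE0) * 0x1000 + (c1 - 0x80) * 0x40 + (c2 - 0x80)) :: pvDecode r
        else Char.ofNat 0xFFFD :: pvDecode (c1 :: c2 :: r)
      | _ => [Char.ofNat 0xFFFD]
    else if b ≤ 0xF4 then
      match bs with
      | c1 :: c2 :: c3 :: r =>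
        if ((if b = 0xF0 then 0x90 ≤ c1 && c1 ≤ 0xBF
             else if b = 0xF4 then 0x80 ≤ c1 && c1 ≤ 0x8F
             else 0x80 ≤ c1 && c1 ≤ 0xBF) && (0x80 ≤ c2 && c2 ≤ 0xBF) && (0x80 ≤ c3 && c3 ≤ 0xBF)) then
          Char.ofNat ((b - 0xF0) * 0x40000 + (c1 - 0x80) * 0x1000 + (c2 - 0x80) * 0x40 + (c3 - 0x80)) :: pvDecode r
        else Char.ofNat 0xFFFD :: pvDecode (c1 :: c2 :: c3 :: r)
      | _ => [Char.ofNat 0xFFFD]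
    else Char.ofNat 0xFFFD :: pvDecode bs
termination_by l => l.length
decreasing_by all_goals simp <;> omega

mutual
-- A's while-loop over the body, one step per iteration (the `for _ in range(2)`
-- octal extension is unrolled to its two checks; int(..,8) is the base-8 value)
def pvLoopA : List Char → List Nat
  | [] => []
  | c :: rest =>
    if c = '\\' then pvEscA rest else c.toNat :: pvLoopA rest
termination_by l => l.length

-- A's loop body after `index += 1` has stepped past a backslash
def pvEscA : List Char → List Nat
  | [] => [0x5C]
  | e :: r =>
    match pvSimpleA? e with
    | some v => v :: pvLoopA r
    | none =>
      if pvIsOct e then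
        match r with
        | [] => pvOctVal e :: pvLoopA []
        | d1 :: r1 =>
          if pvIsOct d1 then
            match r1 with
            | [] => (pvOctVal e * 8 + pvOctVal d1) :: pvLoopA []
            | d2 :: r2 =>
              if pvIsOct d2 then
                (pvOctVal e * 64 + pvOctVal d1 * 8 + pvOctVal d2) :: pvLoopA r2
              else (pvOctVal e * 8 + pvOctVal d1) :: pvLoopA (d2 :: r2)
          else pvOctVal e :: pvLoopA (d1 :: r1)
      else e.toNat :: pvLoopA r
termination_by l => l.length
end

def decode_git_quoted_path_py (path_text : String) : String :=
  let normalized := (PySem.Chars.strip path_text.toList)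
  if normalized.length < 2 ∨
     ¬(PySem.Chars.startswith normalized ['"'] ∧ PySem.Chars.endswith normalized ['"'])
  then String.ofList normalized
  else
    let body := PySem.List.slice normalized (some 1) (some (-1))
    String.ofList (pvDecode (pvLoopA body))

-- ===== PORT B =====

-- Source B's `simple` dict as an association list (no backslash entry)
def pvSimpleTbl : List (Char × Nat) :=
  [('a', 0x07), ('b', 0x08), ('f', 0x0C), ('n', 0x0A), ('r', 0x0D),
   ('t', 0x09), ('v', 0x0B), ('"', 0x22)]

-- utf-8 encode of a backslash-free ASCII fragment (exact on Dom's chars)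
def pvEnc (l : List Char) : List Nat := l.map Char.toNat

-- Source B: head = p[:3]; leading octal run via lstrip("01234567")
def pvOctRun (p : List Char) : List Char := (p.take 3).takeWhile pvIsOct
-- int(digits, 8)
def pvOctNum (ds : List Char) : Nat := ds.foldl (fun a d => a * 8 + pvOctVal d) 0

-- Source B's while-loop over parts[1:]
def pvLoopB : List (List Char) → List Nat
  | [] => []
  | [] :: ps =>
    0x5C :: (match ps with
             | [] => []                           -- lone backslash ending the body
             | q :: qs => pvEnc q ++ pvLoopB qs)  -- escaped backslash, next fragment literal
  | (e :: h) :: ps =>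
    (match pvSimpleTbl.lookup e with
     | some v => v :: pvEnc h
     | none =>
       if pvIsOct e then
         let ds := pvOctRun (e :: h)
         pvOctNum ds :: pvEnc ((e :: h).drop ds.length)
       else pvEnc (e :: h)) ++ pvLoopB ps

-- bytes of parts[0], then the loop over the remaining fragments
def pvBytesB : List (List Char) → List Nat
  | [] => []
  | p :: ps => pvEnc p ++ pvLoopB ps

def decode_git_quoted_path_py_alt (path_text : String) : String :=
  let normalized := (PySem.Chars.strip path_text.toList)
  if normalized.length < 2 ∨
     ¬(PySem.Chars.startswith normalized ['"'] ∧ PySem.Chars.endswith normalized ['"'])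
  then String.ofList normalized
  else
    let body := PySem.List.slice normalized (some 1) (some (-1))
    String.ofList (pvDecode (pvBytesB (body.splitOn '\\')))

-- ===== PRECONDITION & SPEC =====

-- DFA over the body, one char per step: (bytes denoted so far (none = an octal escape
-- denoted a value ≥ 0o400), escape mode m (0 plain / 1 after a backslash / 2 in an
-- octal run), digits read k, octal value v)
def pvScanStep (st : Option (List Nat) × Nat × Nat × Nat) (c : Char) :
    Option (List Nat) × Nat × Nat × Nat :=
  match st with
  | (none, m, k, v) => (none, m, k, v)
  | (some out, 0, _, _) =>
    if c = '\\' then (some out, 1, 0, 0) else (some (out ++ [c.toNat]), 0, 0, 0)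
  | (some out, 1, _, _) =>
    match pvSimpleA? c with
    | some b => (some (out ++ [b]), 0, 0, 0)
    | none =>
      if pvIsOct c then (some out, 2, 1, pvOctVal c)
      else (some (out ++ [c.toNat]), 0, 0, 0)
  | (some out, _, k, v) =>
    if pvIsOct c ∧ k < 3 then (some out, 2, k + 1, v * 8 + pvOctVal c)
    else if ¬ v < 256 then (none, 0, 0, 0)
    else if c = '\\' then (some (out ++ [v]), 1, 0, 0)
    else (some (out ++ [v, c.toNat]), 0, 0, 0)

-- the byte string the body's escape grammar denotes; none iff some octal escape
-- denotes a value ≥ 0o400 (where both Pythons raise ValueError)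
def pvScan (l : List Char) : Option (List Nat) :=
  match l.foldl pvScanStep (some [], 0, 0, 0) with
  | (none, _, _, _) => none
  | (some out, 1, _, _) => some (out ++ [0x5C])
  | (some out, 2, _, v) => if v < 256 then some (out ++ [v]) else none
  | (some out, _, _, _) => some out

-- strict UTF-8 shape (RFC 3629: no overlongs, no surrogates, ≤ U+10FFFF) as a DFA:
-- a lead byte opens a list of allowed continuation ranges, worked off one per byte
def pvUtf8Need (b : Nat) : Option (List (Nat × Nat)) :=
  if b < 0x80 then some []
  else if 0xC2 ≤ b ∧ b ≤ 0xDF then some [(0x80, 0xBF)]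
  else if b = 0xE0 then some [(0xA0, 0xBF), (0x80, 0xBF)]
  else if b = 0xED then some [(0x80, 0x9F), (0x80, 0xBF)]
  else if 0xE0 ≤ b ∧ b ≤ 0xEF then some [(0x80, 0xBF), (0x80, 0xBF)]
  else if b = 0xF0 then some [(0x90, 0xBF), (0x80, 0xBF), (0x80, 0xBF)]
  else if b = 0xF4 then some [(0x80, 0x8F), (0x80, 0xBF), (0x80, 0xBF)]
  else if 0xF0 ≤ b ∧ b ≤ 0xF4 then some [(0x80, 0xBF), (0x80, 0xBF), (0x80, 0xBF)]
  else none

def pvValidUtf8 (bs : List Nat) : Bool :=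
  (bs.foldl (fun st b =>
      match st with
      | none => none
      | some [] => pvUtf8Need b
      | some ((lo, hi) :: rest) => if lo ≤ b ∧ b ≤ hi then some rest else none)
    (some [])) == some []

-- Pre_ excludes quoted inputs whose escapes denote a byte ≥ 0o400 (there A raises
-- ValueError) or a byte string that is not valid UTF-8 (there A's surrogateescape
-- result contains lone surrogates, which no Lean String can represent; B agrees with
-- A on those inputs in Python). All well-formed escapes, including multibyte UTF-8
-- octal sequences like \303\251, are admitted.
def Pre_decode_git_quoted_path_py (path_text : String) : Prop :=
  (let normalized := PySem.Chars.strip path_text.toList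
   (decide (normalized.length < 2 ∨
      ¬(PySem.Chars.startswith normalized ['"'] ∧ PySem.Chars.endswith normalized ['"']))) ||
   (pvScan (PySem.List.slice normalized (some 1) (some (-1)))).elim false pvValidUtf8) = true

instance (path_text : String) : Decidable (Pre_decode_git_quoted_path_py path_text) := by
  unfold Pre_decode_git_quoted_path_py; infer_instance

def pvWitness_decode_git_quoted_path_py : String := "\"a\\tb \\303\\251\""

def Spec_decode_git_quoted_path_py (path_text : String) (out : String) : Prop :=
  out = decode_git_quoted_path_py_alt path_text
instance (path_text : String) (out : String) : Decidable (Spec_decode_git_quoted_path_py path_text out) := by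
  unfold Spec_decode_git_quoted_path_py; infer_instance

-- ===== CLAIM (what is proved, stated in full; the proofs are below) =====
def Claim_equal_decode_git_quoted_path_py : Prop := ∀ (path_text : String), Dom_decode_git_quoted_path_py path_text → Pre_decode_git_quoted_path_py path_text → Spec_decode_git_quoted_path_py path_text (decode_git_quoted_path_py path_text)

-- ===== LEMMAS AND PROOFS =====

-- proof-side unrolled form of B's fragment loop (bridges B's takeWhile/lookup
-- formulation to A's unrolled case tree)
def pvSimpleB? (c : Char) : Option Nat :=
  if c = 'a' then some 0x07 else if c = 'b' then some 0x08
  else if c = 'f' then some 0x0C else if c = 'n' then some 0x0A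
  else if c = 'r' then some 0x0D else if c = 't' then some 0x09
  else if c = 'v' then some 0x0B else if c = '"' then some 0x22 else none

def pvLoopB' : List (List Char) → List Nat
  | [] => []
  | [] :: ps =>
    0x5C :: (match ps with
             | [] => []
             | q :: qs => pvEnc q ++ pvLoopB' qs)
  | (e :: h) :: ps =>
    (match pvSimpleB? e with
     | some v => v :: pvEnc h
     | none =>
       if pvIsOct e then
         match h with
         | [] => [pvOctVal e]
         | d1 :: h1 =>
           if pvIsOct d1 then
             match h1 with
             | [] => [pvOctVal e * 8 + pvOctVal d1]
             | d2 :: h2 =>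
               if pvIsOct d2 then
                 (pvOctVal e * 64 + pvOctVal d1 * 8 + pvOctVal d2) :: pvEnc h2
               else (pvOctVal e * 8 + pvOctVal d1) :: pvEnc (d2 :: h2)
           else pvOctVal e :: pvEnc (d1 :: h1)
       else pvEnc (e :: h)) ++ pvLoopB' ps

def pvBytesB' : List (List Char) → List Nat
  | [] => []
  | p :: ps => pvEnc p ++ pvLoopB' ps

-- association-list lookup, one entry at a time
theorem pv_lookup_cons (c k : Char) (v : Nat) (t : List (Char × Nat)) :
    List.lookup c ((k, v) :: t) = if c = k then some v else List.lookup c t := by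
  rw [List.lookup]
  by_cases h : c = k
  · simp [h]
  · have h' : (c == k) = false := by simp_all
    simp [h', h]

-- B's lookup in the association list is the unrolled dict lookup
theorem pv_lookup_eq (c : Char) : pvSimpleTbl.lookup c = pvSimpleB? c := by
  simp only [pvSimpleTbl, pv_lookup_cons, List.lookup_nil]
  rfl

-- B's takeWhile/foldl octal branch equals the unrolled tree
theorem pv_oct_eq (e : Char) (h : List Char) (he : pvIsOct e = true) :
    (pvOctNum (pvOctRun (e :: h)) :: pvEnc ((e :: h).drop (pvOctRun (e :: h)).length)) =
    (match h with
     | [] => [pvOctVal e]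
     | d1 :: h1 =>
       if pvIsOct d1 then
         match h1 with
         | [] => [pvOctVal e * 8 + pvOctVal d1]
         | d2 :: h2 =>
           if pvIsOct d2 then
             (pvOctVal e * 64 + pvOctVal d1 * 8 + pvOctVal d2) :: pvEnc h2
           else (pvOctVal e * 8 + pvOctVal d1) :: pvEnc (d2 :: h2)
       else pvOctVal e :: pvEnc (d1 :: h1)
     ) := by
  cases h with
  | nil => simp [pvOctRun, pvOctNum, pvEnc, he]
  | cons d1 h1 =>
    by_cases hd1 : pvIsOct d1 = true
    · cases h1 with
      | nil => simp [pvOctRun, pvOctNum, pvEnc, he, hd1]; try ring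
      | cons d2 h2 =>
        by_cases hd2 : pvIsOct d2 = true
        · simp [pvOctRun, pvOctNum, pvEnc, he, hd1, hd2]; try ring
        · simp [pvOctRun, pvOctNum, pvEnc, he, hd1, hd2]; try ring
    · simp [pvOctRun, pvOctNum, pvEnc, he, hd1]

-- B's loop equals its unrolled form
theorem pv_loopB_eq : ∀ ps, pvLoopB ps = pvLoopB' ps
  | [] => by simp [pvLoopB, pvLoopB']
  | [] :: ps => by
    cases ps with
    | nil => simp [pvLoopB, pvLoopB']
    | cons q qs => simp [pvLoopB, pvLoopB', pv_loopB_eq qs]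
  | (e :: h) :: ps => by
    simp only [pvLoopB, pvLoopB', pv_loopB_eq ps, pv_lookup_eq]
    cases hs : pvSimpleB? e with
    | some v => rfl
    | none =>
      by_cases he : pvIsOct e = true
      · simp only [he, if_true]
        rw [pv_oct_eq e h he]
      · simp [he]

theorem pv_bytesB_eq (ps : List (List Char)) : pvBytesB ps = pvBytesB' ps := by
  cases ps with
  | nil => rfl
  | cons p qs => simp [pvBytesB, pvBytesB', pv_loopB_eq qs]

-- splitOnP never returns the empty list of fragments (shape needed below)
theorem pv_split_ex (l : List Char) :
    ∃ q qs, l.splitOnP (· == '\\') = q :: qs := by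
  cases h : l.splitOnP (· == '\\') with
  | nil => exact absurd h (List.splitOnP_ne_nil _ _)
  | cons a b => exact ⟨a, b, rfl⟩

-- the unrolled dict agrees with A's on every char except the backslash (absent in fragments)
theorem pv_simpleB_eq (c : Char) (h : ¬ c = '\\') : pvSimpleB? c = pvSimpleA? c := by
  unfold pvSimpleA? pvSimpleB?
  split_ifs <;> simp_all

theorem pv_simple_none_ne (c : Char) (h : pvSimpleA? c = none) : ¬ c = '\\' := by
  rintro rfl; exact absurd h (by decide)

-- the loops of the two ports compute the same byte list: A's index walk over the body
-- equals B's fragment processing of the body split on backslashes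
theorem pv_key : ∀ n (l : List Char), l.length ≤ n →
    (pvLoopA l = pvBytesB' (l.splitOnP (· == '\\'))) ∧
    (pvEscA l = pvLoopB' (l.splitOnP (· == '\\'))) := by
  intro n
  induction n with
  | zero =>
    intro l hl
    have hnil : l = [] := List.length_eq_zero_iff.mp (Nat.le_zero.mp hl)
    subst hnil
    exact ⟨by simp [pvLoopA, pvBytesB', pvEnc, pvLoopB'], by simp [pvEscA, pvLoopB']⟩
  | succ n ih =>
    intro l hl
    refine ⟨?_, ?_⟩
    · -- Part 1: pvLoopA l = pvBytesB' (splitOnP l)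
      cases l with
      | nil => simp [pvLoopA, pvBytesB', pvEnc, pvLoopB']
      | cons c rest =>
        have hr : rest.length ≤ n := by simp at hl; omega
        by_cases hc : c = '\\'
        · subst hc
          rw [pvLoopA, List.splitOnP_cons]
          simp [pvBytesB', pvEnc, (ih rest hr).2]
        · obtain ⟨q, qs, hq⟩ := pv_split_ex rest
          rw [pvLoopA, List.splitOnP_cons]
          simp [hc, hq, pvBytesB', pvEnc, (ih rest hr).1]
    · -- Part 2: pvEscA l = pvLoopB' (splitOnP l)
      cases l with
      | nil => simp [pvEscA, pvLoopB']
      | cons e r =>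
        have hrn : r.length ≤ n := by simp at hl; omega
        cases hs : pvSimpleA? e with
        | some v =>
          by_cases he : e = '\\'
          · subst he
            have hv : v = 0x5C := by
              have h92 : pvSimpleA? '\\' = some 0x5C := by decide
              rw [hs] at h92; exact Option.some.inj h92
            subst hv
            obtain ⟨q, qs, hq⟩ := pv_split_ex r
            rw [pvEscA.eq_def, List.splitOnP_cons]
            simp [hs, hq, pvLoopB', pvBytesB', pvEnc, (ih r hrn).1]
          · obtain ⟨q, qs, hq⟩ := pv_split_ex r
            rw [pvEscA.eq_def, List.splitOnP_cons]
            simp [hs, he, hq, pvLoopB', pv_simpleB_eq e he, pvBytesB', pvEnc, (ih r hrn).1]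
        | none =>
          have he : ¬ e = '\\' := pv_simple_none_ne e hs
          have hsB : pvSimpleB? e = none := by rw [pv_simpleB_eq e he, hs]
          by_cases ho : pvIsOct e = true
          · -- octal escape: up to two more digits, all inside the same fragment
            cases r with
            | nil =>
              rw [pvEscA.eq_def, List.splitOnP_cons]
              simp [hs, he, ho, pvLoopB', hsB, pvLoopA]
            | cons d1 r1 =>
              have hr1 : r1.length ≤ n := by simp at hl; omega
              by_cases hd1 : d1 = '\\'
              · subst hd1
                have ho1 : pvIsOct '\\' = false := by decide
                rw [pvEscA.eq_def, List.splitOnP_cons, List.splitOnP_cons]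
                simp [hs, he, ho, ho1, pvLoopB', hsB, pvLoopA, (ih r1 hr1).2]
              · obtain ⟨q1, qs1, hq1⟩ := pv_split_ex r1
                by_cases hod1 : pvIsOct d1 = true
                · cases r1 with
                  | nil =>
                    rw [pvEscA.eq_def, List.splitOnP_cons, List.splitOnP_cons]
                    simp [hs, he, ho, hd1, hod1, pvLoopB', hsB, pvLoopA]
                  | cons d2 r2 =>
                    have hr2 : r2.length ≤ n := by simp at hl; omega
                    by_cases hd2 : d2 = '\\'
                    · subst hd2
                      have ho2 : pvIsOct '\\' = false := by decide
                      rw [pvEscA.eq_def, List.splitOnP_cons, List.splitOnP_cons, List.splitOnP_cons]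
                      simp [hs, he, ho, hd1, hod1, ho2, pvLoopB', hsB, pvLoopA,
                            (ih r2 hr2).2]
                    · obtain ⟨q2, qs2, hq2⟩ := pv_split_ex r2
                      by_cases hod2 : pvIsOct d2 = true
                      · rw [pvEscA.eq_def, List.splitOnP_cons, List.splitOnP_cons,
                            List.splitOnP_cons]
                        simp [hs, he, ho, hd1, hod1, hd2, hod2, hq2, pvLoopB', hsB, pvEnc,
                              pvBytesB', (ih r2 hr2).1]
                      · rw [pvEscA.eq_def, List.splitOnP_cons, List.splitOnP_cons,
                            List.splitOnP_cons]
                        simp [hs, he, ho, hd1, hod1, hd2, hod2, hq2, pvLoopB', hsB, pvEnc,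
                              pvBytesB', (ih (d2 :: r2) hr1).1,
                              List.splitOnP_cons]
                · rw [pvEscA.eq_def, List.splitOnP_cons, List.splitOnP_cons]
                  simp [hs, he, ho, hd1, hod1, hq1, pvLoopB', hsB, pvEnc, pvBytesB',
                        (ih (d1 :: r1) hrn).1, List.splitOnP_cons]
          · obtain ⟨q, qs, hq⟩ := pv_split_ex r
            rw [pvEscA.eq_def, List.splitOnP_cons]
            simp [hs, he, ho, hq, pvLoopB', hsB, pvEnc, pvBytesB', (ih r hrn).1]

-- ===== VERDICT (by name: the statement is the Claim_ definition above) =====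
theorem decode_git_quoted_path_py_spec : Claim_equal_decode_git_quoted_path_py := by
  intro path_text _ _
  unfold Spec_decode_git_quoted_path_py decode_git_quoted_path_py decode_git_quoted_path_py_alt
  simp only []
  split
  · rfl
  · have h := (pv_key _ (PySem.List.slice (PySem.Chars.strip path_text.toList) (some 1) (some (-1))) le_rfl).1
    rw [h, ← pv_bytesB_eq]
    simp only [List.splitOn]
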